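-- pv_equiv track=rewrite | github.com/crisjf/pantheon_tools | johnny5/parse_functions.py | correct_titles
-- ===== SOURCE A (Python) =====
-- def correct_titles(title):
--     '''Checks the capitalization of the given title and returns a set of possible uses'''
--     titles = set([title])
--     title = title.lower()
--     bag = set(['a','an','the','for','and','nor','but','or','yet','so','at','around','by','after','along','for','from','of','on','to','with','without'])
--     words = title.split(' ')
--     words[0] = words[0][0].upper()+words[0][1:]
--     titles.add(str.join(' ', words))
--     #titles.add(' '.join(words))
--     words[-1] = words[-1][0].upper()+words[-1][1:]
--     titles.add(str.join(' ', words))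
--     #titles.add(' '.join(words))
--     for i,word in enumerate(words):
--         if i!=0:
--             if word not in bag:
--                 words[i] = words[i][0].upper()+words[i][1:]
--     titles.add(str.join(' ', words))
--     #titles.add(' '.join(words))
--     words[-1] = words[-1][0].upper()+words[-1][1:]
--     titles.add(str.join(' ', words))
--     #titles.add(' '.join(words))
--     return list(titles)
-- ===== SOURCE B (Python) =====
-- # Alternative decomposition: rank each word once (1=first, 2=last, 3=non-stopword
-- # middle, 4=stopword middle) and build all three capitalization variants in a
-- # single pass with three string accumulators; no list mutation, no snapshots.
-- BAG = frozenset(['a', 'an', 'the', 'for', 'and', 'nor', 'but', 'or', 'yet', 'so',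
--                  'at', 'around', 'by', 'after', 'along', 'from', 'of', 'on', 'to',
--                  'with', 'without'])
--
--
-- def correct_titles(title):
--     '''Checks the capitalization of the given title and returns a set of possible uses'''
--     words = title.lower().split(' ')
--     n = len(words)
--     v1 = v2 = v3 = ''
--     for i, w in enumerate(words):
--         c = w[0].upper() + w[1:]
--         rank = 1 if i == 0 else (2 if i == n - 1 else (3 if w not in BAG else 4))
--         sep = ' ' if i else ''
--         v1 += sep + (c if rank <= 1 else w)
--         v2 += sep + (c if rank <= 2 else w)
--         v3 += sep + (c if rank <= 3 else w)
--     return list({title, v1, v2, v3})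
-- ===== Notes on version B (the rewrite author's own statement) =====
-- stated objective: alternative
-- what changed: A threads cumulative in-place mutations of one words list through four set.add snapshots; B assigns each word a capitalization rank once (1=first, 2=last, 3=non-stopword middle, 4=stopword middle) and builds all three variant strings simultaneously in a single pass with three string accumulators, capitalizing word i in variant k iff rank(i) <= k, then dedupes {title, v1, v2, v3}.
import Mathlib
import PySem

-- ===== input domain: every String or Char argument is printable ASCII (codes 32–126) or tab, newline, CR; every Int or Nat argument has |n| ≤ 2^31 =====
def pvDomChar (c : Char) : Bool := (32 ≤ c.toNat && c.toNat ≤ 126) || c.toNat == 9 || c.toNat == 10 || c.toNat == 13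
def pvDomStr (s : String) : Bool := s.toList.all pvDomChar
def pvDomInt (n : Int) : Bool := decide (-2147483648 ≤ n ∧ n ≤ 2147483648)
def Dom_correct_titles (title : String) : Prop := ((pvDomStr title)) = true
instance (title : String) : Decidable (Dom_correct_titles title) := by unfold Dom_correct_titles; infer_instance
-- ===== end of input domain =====

-- B replaces A's cumulative in-place list mutation and snapshotting by a one-pass
-- rank-threshold scheme building all three variant strings simultaneously (objective: alternative).
-- Strings are represented as List Char (PySem.Chars is exact there); sets as PySem.Set.

-- ===== PORT A =====
-- bag = set([...]) from A (the literal list contains 'for' twice; Set.ofList dedups like set())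
def pvBag : PySem.Set (List Char) :=
  PySem.Set.ofList
    (["a","an","the","for","and","nor","but","or","yet","so","at","around","by",
      "after","along","for","from","of","on","to","with","without"].map String.toList)

-- w[0].upper() + w[1:] ; Python raises IndexError exactly when w == '' (excluded by Pre_)
def pvCap (w : List Char) : List Char :=
  match w with
  | [] => []
  | c :: r => PySem.Chars.upperChar c :: r

def correct_titles (title : String) : List String :=
  let titles0 : PySem.Set (List Char) := PySem.Set.ofList [title.toList]
  let t := PySem.Chars.lower title.toList
  let ws0 := PySem.Chars.splitOn t [' ']
  let ws1 := PySem.List.pySetD ws0 0 (pvCap (PySem.List.pyGetD ws0 0 []))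
  let titles1 := PySem.Set.add titles0 (PySem.Chars.join [' '] ws1)
  let ws2 := PySem.List.pySetD ws1 (-1) (pvCap (PySem.List.pyGetD ws1 (-1) []))
  let titles2 := PySem.Set.add titles1 (PySem.Chars.join [' '] ws2)
  let ws3 := (PySem.List.enumerate ws2).foldl
    (fun ws iw =>
      if iw.1 ≠ 0 then
        (if !PySem.Set.contains pvBag iw.2 then PySem.List.pySetD ws iw.1 (pvCap iw.2) else ws)
      else ws) ws2
  let titles3 := PySem.Set.add titles2 (PySem.Chars.join [' '] ws3)
  let ws4 := PySem.List.pySetD ws3 (-1) (pvCap (PySem.List.pyGetD ws3 (-1) []))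
  let titles4 := PySem.Set.add titles3 (PySem.Chars.join [' '] ws4)
  titles4.map String.ofList

-- ===== PORT B =====
-- BAG = frozenset([...]) from Source B (21 distinct stopwords)
def pvBagAlt : PySem.Set (List Char) :=
  PySem.Set.ofList
    (["a","an","the","for","and","nor","but","or","yet","so","at","around","by",
      "after","along","from","of","on","to","with","without"].map String.toList)

-- rank = 1 if i == 0 else (2 if i == n-1 else (3 if w not in BAG else 4))
def pvRankB (n : Int) (iw : Int × List Char) : Int :=
  if iw.1 == 0 then 1
  else if iw.1 == n - 1 then 2
  else if !PySem.Set.contains pvBagAlt iw.2 then 3 else 4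

-- sep = ' ' if i else ''
def pvSepB (i : Int) : List Char := if i ≠ 0 then [' '] else []

-- one iteration of Source B's loop: extend the three accumulators
def pvStepB (n : Int) (v : List Char × List Char × List Char) (iw : Int × List Char) :
    List Char × List Char × List Char :=
  let c := pvCap iw.2
  let rank := pvRankB n iw
  let sep := pvSepB iw.1
  (v.1 ++ (sep ++ (if rank ≤ 1 then c else iw.2)),
   v.2.1 ++ (sep ++ (if rank ≤ 2 then c else iw.2)),
   v.2.2 ++ (sep ++ (if rank ≤ 3 then c else iw.2)))

def correct_titles_alt (title : String) : List String :=
  let words := PySem.Chars.splitOn (PySem.Chars.lower title.toList) [' ']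
  let n : Int := (words.length : Int)
  let v := (PySem.List.enumerate words).foldl (pvStepB n) ([], [], [])
  (PySem.Set.ofList [title.toList, v.1, v.2.1, v.2.2]).map String.ofList

-- ===== PRECONDITION & SPEC =====
-- Pre_ excludes exactly the titles containing an empty word (empty title, leading/trailing
-- or doubled spaces), on which the Python A raises IndexError at w[0].
def Pre_correct_titles (title : String) : Prop :=
  ∀ w ∈ PySem.Chars.splitOn (PySem.Chars.lower title.toList) [' '], w ≠ []
instance (title : String) : Decidable (Pre_correct_titles title) := by
  unfold Pre_correct_titles; infer_instance

def pvWitness_correct_titles : String := "the lord of the rings"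

def Spec_correct_titles (title : String) (out : List String) : Prop := out = correct_titles_alt title
instance (title : String) (out : List String) : Decidable (Spec_correct_titles title out) := by unfold Spec_correct_titles; infer_instance

-- ===== CLAIM (what is proved, stated in full; the proofs are below) =====
def Claim_equal_correct_titles : Prop := ∀ (title : String), Dom_correct_titles title → Pre_correct_titles title → Spec_correct_titles title (correct_titles title)

-- ===== LEMMAS AND PROOFS =====

-- the middle-word update of A's loop
def pvGmid (w : List Char) : List Char :=
  if !PySem.Set.contains pvBag w then pvCap w else w

-- the word Source B's variant k shows at position iw
def pvChoiceB (n k : Int) (iw : Int × List Char) : List Char :=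
  if pvRankB n iw ≤ k then pvCap iw.2 else iw.2

theorem pvUpper_notlower (c : Char) :
    PySem.Chars.islower (PySem.Chars.upperChar c) = false := by
  simp only [PySem.Chars.upperChar]
  split
  · rename_i h
    simp only [PySem.Chars.islower, Bool.and_eq_true, decide_eq_true_eq, Char.le_def] at h ⊢
    obtain ⟨h1, h2⟩ := h
    have hv1 : 97 ≤ c.toNat := h1
    have hv2 : c.toNat ≤ 122 := h2
    have hval : (c.toNat - 32).isValidChar := by left; omega
    have heq : (Char.ofNat (c.toNat - 32)).toNat = c.toNat - 32 := by
      rw [Char.toNat_ofNat]; simp [hval]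
    have hlt : (Char.ofNat (c.toNat - 32)).toNat < 97 := by omega
    simp only [Bool.and_eq_false_iff]
    left
    simp only [decide_eq_false_iff_not]
    intro hle
    have : (97 : Nat) ≤ (Char.ofNat (c.toNat - 32)).toNat := UInt32.le_iff_toNat_le.mp hle
    omega
  · rename_i h
    simpa [PySem.Chars.islower] using h

theorem pvUpper_idem (c : Char) :
    PySem.Chars.upperChar (PySem.Chars.upperChar c) = PySem.Chars.upperChar c := by
  rw [show PySem.Chars.upperChar (PySem.Chars.upperChar c)
        = if PySem.Chars.islower (PySem.Chars.upperChar c) = true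
          then Char.ofNat ((PySem.Chars.upperChar c).toNat - 32)
          else PySem.Chars.upperChar c from rfl,
      pvUpper_notlower]
  simp

theorem pvCap_idem (w : List Char) : pvCap (pvCap w) = pvCap w := by
  cases w with
  | nil => rfl
  | cons c r => simp [pvCap, pvUpper_idem]

theorem pvGmid_cap (w : List Char) : pvGmid (pvCap w) = pvCap w := by
  simp [pvGmid, pvCap_idem]

theorem pvBag_eq_alt : pvBagAlt = pvBag := by decide

-- xs[-1] on a nonempty list reads the last element
theorem pvLast {α : Type} (xs : List α) (z : α) (d : α) :
    PySem.List.pyGetD (xs ++ [z]) (-1) d = z := by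
  have hidx : PySem.List.pyIdx? (xs.length + 1) (-1) = some xs.length := by
    simp [PySem.List.pyIdx?]
  simp [PySem.List.pyGetD, PySem.List.pyGet?, hidx]

-- xs[-1] = v on a nonempty list writes the last position
theorem pvSetLast {α : Type} (xs : List α) (z v : α) :
    PySem.List.pySetD (xs ++ [z]) (-1) v = xs ++ [v] := by
  have hidx : PySem.List.pyIdx? (xs.length + 1) (-1) = some xs.length := by
    simp [PySem.List.pyIdx?]
  have hset : (xs ++ [z]).set xs.length v = xs ++ [v] := by
    induction xs with
    | nil => rfl
    | cons a xs ih => simp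
  simp [PySem.List.pySetD, PySem.List.pySet?, hidx, hset]

-- writing position pre.length of pre ++ w :: m
theorem pvSetMid {α : Type} (pre : List α) (w : α) (m : List α) (v : α) :
    (pre ++ w :: m).set pre.length v = pre ++ v :: m := by
  induction pre with
  | nil => rfl
  | cons a pre ih => simp [ih]

theorem pvGet0 {α : Type} (a : α) (l : List α) (d : α) :
    PySem.List.pyGetD (a :: l) 0 d = a := by
  simp [PySem.List.pyGetD, PySem.List.pyGet?, PySem.List.pyIdx?]

theorem pvSet0 {α : Type} (a v : α) (l : List α) :
    PySem.List.pySetD (a :: l) 0 v = v :: l := by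
  simp [PySem.List.pySetD, PySem.List.pySet?, PySem.List.pyIdx?, List.set]

-- mapping a condition over enumerate of a list with an explicit last element
theorem pvEnumMap {α : Type} (f : Int → α → α) (g : α → α) :
    ∀ (m : List α) (s : Nat) (z z' : α),
      (∀ (k : Nat) (hk : k < m.length), f ((s : Int) + k) m[k] = g m[k]) →
      f ((s : Int) + m.length) z = z' →
      (PySem.List.enumerate (m ++ [z]) (s : Int)).map (fun iw => f iw.1 iw.2)
        = m.map g ++ [z'] := by
  intro m
  induction m with
  | nil =>
    intro s z z' _ hlast
    simp only [List.length_nil, Nat.cast_zero, add_zero] at hlast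
    simp [PySem.List.enumerate_cons, PySem.List.enumerate_nil, hlast]
  | cons a m ih =>
    intro s z z' hmid hlast
    have h0 : f ((s : Int)) a = g a := by simpa using hmid 0 (by simp)
    have hmid' : ∀ (k : Nat) (hk : k < m.length),
        f (((s + 1 : Nat) : Int) + k) m[k] = g m[k] := by
      intro k hk
      have h := hmid (k + 1) (by simpa using Nat.succ_lt_succ hk)
      have hc : ((s : Int) + ((k + 1 : Nat) : Int)) = (((s + 1 : Nat) : Int) + (k : Int)) := by
        push_cast; ring
      rw [hc] at h
      simpa using h
    have hlast' : f (((s + 1 : Nat) : Int) + (m.length : Int)) z = z' := by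
      have hc : (((s + 1 : Nat) : Int) + (m.length : Int))
          = ((s : Int) + ((a :: m).length : Int)) := by
        push_cast [List.length_cons]; ring
      rw [hc]; exact hlast
    simp only [List.cons_append, PySem.List.enumerate_cons, List.map_cons, h0]
    rw [show ((s : Int) + 1) = ((s + 1 : Nat) : Int) by push_cast; ring]
    rw [ih (s + 1) z z' hmid' hlast']

-- A's for-loop over enumerate(words), started past the first word
theorem pvLoopA :
    ∀ (m pre : List (List Char)), 1 ≤ pre.length →
      (PySem.List.enumerate m (pre.length : Int)).foldl
        (fun ws iw =>
          if iw.1 ≠ 0 then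
            (if !PySem.Set.contains pvBag iw.2 then PySem.List.pySetD ws iw.1 (pvCap iw.2)
             else ws)
          else ws) (pre ++ m)
      = pre ++ m.map pvGmid := by
  intro m
  induction m with
  | nil => intro pre _; simp [PySem.List.enumerate_nil]
  | cons w m ih =>
    intro pre hpre
    have hne : ((pre.length : Int)) ≠ 0 := by
      have h1 : (1 : Int) ≤ (pre.length : Int) := by exact_mod_cast hpre
      omega
    have hstep :
        (if (pre.length : Int) ≠ 0 then
           (if !PySem.Set.contains pvBag w then
              PySem.List.pySetD (pre ++ w :: m) (pre.length : Int) (pvCap w)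
            else pre ++ w :: m)
         else pre ++ w :: m) = pre ++ pvGmid w :: m := by
      rw [if_pos hne]
      unfold pvGmid
      split
      · rw [PySem.List.pySetD_natCast, pvSetMid]
      · rfl
    simp only [PySem.List.enumerate_cons, List.foldl_cons]
    rw [hstep]
    have : pre ++ pvGmid w :: m = (pre ++ [pvGmid w]) ++ m := by simp
    rw [this]
    have hcast : ((pre.length : Int) + 1) = (((pre ++ [pvGmid w]).length : Nat) : Int) := by
      simp
    rw [hcast, ih (pre ++ [pvGmid w]) (by simp)]
    simp

-- ' '.join over an explicit head
theorem pvJoinCons (x : List Char) (l : List (List Char)) :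
    PySem.Chars.join [' '] (x :: l) = x ++ l.flatMap (fun w => ' ' :: w) := by
  induction l generalizing x with
  | nil => simp [PySem.Chars.join, List.intercalate]
  | cons y t ih => rw [PySem.Chars.join_cons_cons, ih]; simp

-- Source B's fold builds each accumulator by pure appending
theorem pvFoldB (n : Int) :
    ∀ (t : List (List Char)) (s : Int) (p : List Char × List Char × List Char),
      (PySem.List.enumerate t s).foldl (pvStepB n) p
        = (p.1 ++ (PySem.List.enumerate t s).flatMap
              (fun iw => pvSepB iw.1 ++ pvChoiceB n 1 iw),
           p.2.1 ++ (PySem.List.enumerate t s).flatMap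
              (fun iw => pvSepB iw.1 ++ pvChoiceB n 2 iw),
           p.2.2 ++ (PySem.List.enumerate t s).flatMap
              (fun iw => pvSepB iw.1 ++ pvChoiceB n 3 iw)) := by
  intro t
  induction t with
  | nil => intro s p; simp [PySem.List.enumerate_nil]
  | cons a t ih =>
    intro s p
    simp only [PySem.List.enumerate_cons, List.foldl_cons, List.flatMap_cons, ih]
    simp [pvStepB, pvChoiceB, List.append_assoc]

-- with all indices ≥ 1 the separator is always ' '
theorem pvFlatSep (F : Int × List Char → List Char) :
    ∀ (t : List (List Char)) (s : Nat), 1 ≤ s →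
      (PySem.List.enumerate t ((s : Nat) : Int)).flatMap (fun iw => pvSepB iw.1 ++ F iw)
        = ((PySem.List.enumerate t ((s : Nat) : Int)).map F).flatMap (fun w => ' ' :: w) := by
  intro t
  induction t with
  | nil => intro s _; simp [PySem.List.enumerate_nil]
  | cons a t ih =>
    intro s hs
    have hne : (((s : Nat) : Int)) ≠ 0 := by
      have : (1 : Int) ≤ ((s : Nat) : Int) := by exact_mod_cast hs
      omega
    simp only [PySem.List.enumerate_cons, List.flatMap_cons, List.map_cons]
    rw [show (((s : Nat) : Int) + 1) = (((s + 1 : Nat) : Nat) : Int) by push_cast; ring,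
      ih (s + 1) (by omega)]
    simp [pvSepB, show s ≠ 0 by omega]

-- head position: rank 1, no separator, capitalized in every variant
theorem pvChoice0 (n k : Int) (hk : 1 ≤ k) (a : List Char) :
    pvSepB 0 ++ pvChoiceB n k (0, a) = pvCap a := by
  simp [pvSepB, pvChoiceB, pvRankB, hk]

-- set(...) adds: the ofList of an explicit list is the chain of adds
theorem pvOfList4 {α : Type} [BEq α] (t a b c : α) :
    PySem.Set.ofList [t, a, b, c]
      = PySem.Set.add (PySem.Set.add (PySem.Set.add (PySem.Set.ofList [t]) a) b) c := by
  rfl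

theorem pvAddAdd {α : Type} [BEq α] [LawfulBEq α] (s : PySem.Set α) (x : α) :
    PySem.Set.add (PySem.Set.add s x) x = PySem.Set.add s x := by
  simp only [PySem.Set.add, PySem.Set.contains]
  split_ifs with h1 h2 <;> simp_all

theorem correct_titles_spec : Claim_equal_correct_titles := by
  intro title _ _
  unfold Spec_correct_titles correct_titles correct_titles_alt
  simp only []
  generalize title.toList = T
  generalize PySem.Chars.splitOn (PySem.Chars.lower T) [' '] = ws0
  cases ws0 with
  | nil =>
    rw [pvFoldB]
    simp only [PySem.List.pySetD, PySem.List.pySet?, PySem.List.pyIdx?,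
      PySem.List.enumerate_nil, List.flatMap_nil, List.append_nil]
    norm_num
    simp only [pvOfList4, pvAddAdd]
  | cons a r =>
    rcases List.eq_nil_or_concat r with rfl | ⟨m, z, rfl⟩
    · -- singleton title
      rw [pvGet0, pvSet0]
      rw [show ([pvCap a] : List (List Char)) = ([] : List (List Char)) ++ [pvCap a] from rfl]
      rw [pvLast, pvSetLast, pvCap_idem]
      rw [pvFoldB]
      simp only [PySem.List.enumerate_cons, PySem.List.enumerate_nil, List.flatMap_cons,
        List.flatMap_nil, List.append_nil, List.nil_append]
      rw [pvChoice0 _ 1 (by norm_num), pvChoice0 _ 2 (by norm_num),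
        pvChoice0 _ 3 (by norm_num)]
      norm_num [PySem.List.enumerate_cons, PySem.List.enumerate_nil, PySem.List.pyGetD,
        PySem.List.pyGet?, PySem.List.pyIdx?, PySem.List.pySetD, PySem.List.pySet?,
        pvCap_idem, pvJoinCons]
      simp only [pvOfList4, pvAddAdd]
    · -- general title: at least two words, ws0 = a :: m ++ [z]
      simp only [List.concat_eq_append]
      rw [pvGet0, pvSet0]
      rw [show pvCap a :: (m ++ [z]) = (pvCap a :: m) ++ [z] from rfl]
      rw [pvLast, pvSetLast]
      rw [show (pvCap a :: m) ++ [pvCap z] = pvCap a :: (m ++ [pvCap z]) from rfl]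
      rw [PySem.List.enumerate_cons, List.foldl_cons]
      rw [if_neg (by norm_num : ¬ ((0 : Int) ≠ 0))]
      have hloop :
          List.foldl
            (fun ws iw =>
              if iw.1 ≠ 0 then
                (if !PySem.Set.contains pvBag iw.2 then PySem.List.pySetD ws iw.1 (pvCap iw.2)
                 else ws)
              else ws)
            (pvCap a :: (m ++ [pvCap z])) (PySem.List.enumerate (m ++ [pvCap z]) (0 + 1))
          = pvCap a :: (List.map pvGmid m ++ [pvCap z]) := by
        have h := pvLoopA (m ++ [pvCap z]) [pvCap a] (by simp)
        simpa [pvGmid_cap] using h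
      rw [hloop]
      rw [show pvCap a :: (List.map pvGmid m ++ [pvCap z])
            = (pvCap a :: List.map pvGmid m) ++ [pvCap z] from rfl]
      rw [pvLast, pvSetLast, pvCap_idem]
      -- B side: the triple fold, component by component
      rw [pvFoldB]
      set n : Int := (((a :: (m ++ [z])).length : Nat) : Int) with hn
      have hnval : n = (m.length : Int) + 2 := by
        rw [hn]; push_cast [List.length_cons, List.length_append, List.length_nil]; ring
      simp only [PySem.List.enumerate_cons, List.flatMap_cons, List.nil_append]
      rw [pvChoice0 _ 1 (by norm_num), pvChoice0 _ 2 (by norm_num),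
        pvChoice0 _ 3 (by norm_num)]
      rw [show ((0 : Int) + 1) = (((1 : Nat) : Nat) : Int) by norm_num]
      rw [pvFlatSep _ _ 1 (le_refl 1), pvFlatSep _ _ 1 (le_refl 1),
        pvFlatSep _ _ 1 (le_refl 1)]
      -- evaluate the three mapped choice lists
      have hmid : ∀ (k : Nat) (hk : k < m.length) (kk : Int), kk ≤ 2 →
          ¬ pvRankB n (((1 : Nat) : Int) + k, m[k]) ≤ kk := by
        intro k hk kk hkk
        simp only [pvRankB, hnval]
        rw [if_neg (by simp only [beq_iff_eq]; push_cast; omega),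
          if_neg (by simp only [beq_iff_eq]; push_cast; omega)]
        split <;> omega
      have hlastrank : pvRankB n (((1 : Nat) : Int) + (m.length : Int), z) = 2 := by
        simp only [pvRankB, hnval]
        rw [if_neg (by simp only [beq_iff_eq]; push_cast; omega),
          if_pos (by simp only [beq_iff_eq]; push_cast; omega)]
      have hv1 :
          (PySem.List.enumerate (m ++ [z]) (((1 : Nat) : Nat) : Int)).map (pvChoiceB n 1)
            = m.map id ++ [z] := by
        refine pvEnumMap (fun i w => pvChoiceB n 1 (i, w)) id m 1 z z ?_ ?_
        · intro k hk
          simp only [pvChoiceB]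
          rw [if_neg (hmid k hk 1 (by norm_num))]
          simp
        · simp only [pvChoiceB]
          rw [if_neg (by rw [hlastrank]; omega)]
      have hv2 :
          (PySem.List.enumerate (m ++ [z]) (((1 : Nat) : Nat) : Int)).map (pvChoiceB n 2)
            = m.map id ++ [pvCap z] := by
        refine pvEnumMap (fun i w => pvChoiceB n 2 (i, w)) id m 1 z (pvCap z) ?_ ?_
        · intro k hk
          simp only [pvChoiceB]
          rw [if_neg (hmid k hk 2 (by norm_num))]
          simp
        · simp only [pvChoiceB]
          rw [if_pos (by rw [hlastrank])]
      have hv3 :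
          (PySem.List.enumerate (m ++ [z]) (((1 : Nat) : Nat) : Int)).map (pvChoiceB n 3)
            = m.map pvGmid ++ [pvCap z] := by
        refine pvEnumMap (fun i w => pvChoiceB n 3 (i, w)) pvGmid m 1 z (pvCap z) ?_ ?_
        · intro k hk
          have h1 : ((((1 : Nat) : Int) + (k : Int)) == (0 : Int)) = false := by
            simp only [beq_eq_false_iff_ne, ne_eq]; push_cast; omega
          have h2 : ((((1 : Nat) : Int) + (k : Int)) == n - 1) = false := by
            simp only [beq_eq_false_iff_ne, ne_eq, hnval]; push_cast; omega
          simp only [pvChoiceB, pvRankB, h1, h2, pvBag_eq_alt,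
            Bool.false_eq_true, if_false, pvGmid]
          by_cases hc : m[k] ∈ pvBag <;> simp [hc]
        · simp only [pvChoiceB]
          rw [if_pos (by rw [hlastrank]; omega)]
      rw [hv1, hv2, hv3, List.map_id]
      simp only [List.cons_append]
      simp only [pvJoinCons]
      simp only [pvOfList4, pvAddAdd]
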